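-- pv_equiv track=rewrite | github.com/twopercent/advent2015 | day5.py | one_letter_repeat
-- ===== SOURCE A (Python) =====
-- def one_letter_repeat(test_word):
--     result = False
--     for index in range(len(test_word) - 2):
--         test_letter = test_word[index]
--         if test_letter == test_word[index + 2]:
--             result = True
--             break
--     return result
-- ===== SOURCE B (Python) =====
-- def _split(s):
--     # de-interleave: (characters at even positions, characters at odd positions)
--     evens = []
--     odds = []
--     take_even = True
--     for ch in s:
--         (evens if take_even else odds).append(ch)
--         take_even = not take_even
--     return (evens, odds)
--
-- def _adj(chars):
--     # does the sequence contain two equal adjacent characters?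
--     prev = None
--     for ch in chars:
--         if ch == prev:
--             return True
--         prev = ch
--     return False
--
-- def one_letter_repeat(test_word):
--     evens, odds = _split(test_word)
--     return _adj(evens) or _adj(odds)
-- ===== Notes on version B (the rewrite author's own statement) =====
-- stated objective: alternative
-- what changed: Instead of scanning indices comparing word[i] with word[i+2], B de-interleaves the string into its even-position and odd-position subsequences and checks each subsequence for two equal adjacent characters.
import Mathlib
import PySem

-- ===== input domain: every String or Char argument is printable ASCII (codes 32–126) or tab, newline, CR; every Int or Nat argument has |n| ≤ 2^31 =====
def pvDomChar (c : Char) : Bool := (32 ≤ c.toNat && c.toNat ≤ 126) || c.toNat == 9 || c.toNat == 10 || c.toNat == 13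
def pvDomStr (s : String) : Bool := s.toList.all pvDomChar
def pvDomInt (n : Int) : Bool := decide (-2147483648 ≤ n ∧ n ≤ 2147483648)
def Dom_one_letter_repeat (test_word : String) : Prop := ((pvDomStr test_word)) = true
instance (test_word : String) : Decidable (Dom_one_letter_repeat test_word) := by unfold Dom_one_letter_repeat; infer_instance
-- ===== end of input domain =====

-- B de-interleaves the string into even-/odd-position subsequences and looks for equal adjacent characters there, instead of A's index loop comparing word[i] with word[i+2]; same result, return value only.

-- ===== PORT A =====
-- A's for-loop over range(len-2) with break: recursion over the index list, returning at the first match.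
def pvLoopA (cs : List Char) : List Int → Bool
  | [] => false
  | i :: rest =>
    match PySem.List.pyGet? cs i, PySem.List.pyGet? cs (i + 2) with
    | some a, some b => if a == b then true else pvLoopA cs rest
    | _, _ => false   -- unreachable: range(len-2) indices are in range

def one_letter_repeat (test_word : String) : Bool :=
  pvLoopA test_word.toList (PySem.List.pyRange 0 ((test_word.toList.length : Int) - 2) 1)

-- ===== PORT B =====
-- _split's loop: accumulate evens/odds (reversed) with the take_even toggle, reverse at the end.
def pvSplitLoop : List Char → List Char → List Char → Bool → List Char × List Char
  | [], evens, odds, _ => (evens.reverse, odds.reverse)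
  | c :: rest, evens, odds, takeEven =>
    if takeEven then pvSplitLoop rest (c :: evens) odds false
    else pvSplitLoop rest evens (c :: odds) true

-- _adj's loop: prev starts as None, return True on ch == prev.
def pvAdjLoop : List Char → Option Char → Bool
  | [], _ => false
  | c :: rest, prev => if some c == prev then true else pvAdjLoop rest (some c)

def one_letter_repeat_alt (test_word : String) : Bool :=
  let p := pvSplitLoop test_word.toList [] [] true
  pvAdjLoop p.1 none || pvAdjLoop p.2 none

-- ===== PRECONDITION & SPEC =====
def Spec_one_letter_repeat (test_word : String) (out : Bool) : Prop := out = one_letter_repeat_alt test_word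
instance (test_word : String) (out : Bool) : Decidable (Spec_one_letter_repeat test_word out) := by unfold Spec_one_letter_repeat; infer_instance

-- ===== CLAIM (what is proved, stated in full; the proofs are below) =====
def Claim_equal_one_letter_repeat : Prop := ∀ (test_word : String), Dom_one_letter_repeat test_word → Spec_one_letter_repeat test_word (one_letter_repeat test_word)

-- ===== LEMMAS AND PROOFS =====

-- recursive reformulations of B's two loops, used only by the proofs
def pvSplit : List Char → List Char × List Char
  | [] => ([], [])
  | c :: rest =>
    let p := pvSplit rest
    (c :: p.2, p.1)

def pvAdj : List Char → Bool
  | [] => false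
  | [_] => false
  | a :: b :: rest => a == b || pvAdj (b :: rest)

-- the split loop computes pvSplit (with the toggle swapping the roles of the accumulators)
lemma pvSplitLoop_eq (cs : List Char) : ∀ (evens odds : List Char),
    pvSplitLoop cs evens odds true = (evens.reverse ++ (pvSplit cs).1, odds.reverse ++ (pvSplit cs).2) ∧
    pvSplitLoop cs evens odds false = (evens.reverse ++ (pvSplit cs).2, odds.reverse ++ (pvSplit cs).1) := by
  induction cs with
  | nil => intro evens odds; simp [pvSplitLoop, pvSplit]
  | cons c rest ih =>
    intro evens odds
    constructor
    · simp only [pvSplitLoop, if_pos]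
      rw [(ih (c :: evens) odds).2]
      simp [pvSplit]
    · simp only [pvSplitLoop, if_neg]
      rw [(ih evens (c :: odds)).1]
      simp [pvSplit]

-- the adjacency loop with a real previous character is pvAdj with it prepended
lemma pvAdjLoop_some (cs : List Char) : ∀ (p : Char),
    pvAdjLoop cs (some p) = pvAdj (p :: cs) := by
  induction cs with
  | nil => intro p; simp [pvAdjLoop, pvAdj]
  | cons c rest ih =>
    intro p
    simp only [pvAdjLoop, pvAdj, ih c]
    rw [show ((some c == some p)) = (p == c) by simp [BEq.comm]]
    cases h : (p == c) <;> simp [h, pvAdj]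

lemma pvAdjLoop_none (cs : List Char) : pvAdjLoop cs none = pvAdj cs := by
  cases cs with
  | nil => rfl
  | cons c rest =>
    simp only [pvAdjLoop, pvAdjLoop_some]
    rfl


-- range shift: range(1, m+1) is range(0, m) with every index bumped by one
lemma pvRange_shift (m : Int) :
    PySem.List.pyRange 1 (m + 1) 1 = (PySem.List.pyRange 0 m 1).map (· + 1) := by
  rw [PySem.List.pyRange_one, PySem.List.pyRange_one]
  simp only [List.map_map]
  have h : m + 1 - 1 = m - 0 := by ring
  rw [h]
  exact List.map_congr_left (fun k _ => by simp [Function.comp]; ring)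

-- shifting every index by one and prepending a head leaves the loop unchanged
lemma pvLoopA_shift (c : Char) (cs : List Char) (is : List Int)
    (h : ∀ i ∈ is, 0 ≤ i) :
    pvLoopA (c :: cs) (is.map (· + 1)) = pvLoopA cs is := by
  induction is with
  | nil => rfl
  | cons i rest ih =>
    have hi : 0 ≤ i := h i (by simp)
    have h1 : PySem.List.pyGet? (c :: cs) (i + 1) = PySem.List.pyGet? cs i := by
      have := PySem.List.pyGet?_cons_succ (x := c) (xs := cs) (n := i.toNat)
      rwa [Int.toNat_of_nonneg hi] at this
    have h2 : PySem.List.pyGet? (c :: cs) (i + 1 + 2) = PySem.List.pyGet? cs (i + 2) := by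
      have := PySem.List.pyGet?_cons_succ (x := c) (xs := cs) (n := (i + 2).toNat)
      rw [Int.toNat_of_nonneg (by omega)] at this
      rw [show i + 1 + 2 = i + 2 + 1 by ring]
      exact this
    simp only [List.map_cons, pvLoopA, h1, h2]
    rw [ih (fun j hj => h j (by simp [hj]))]

-- A's index loop equals the gap-2 pairing, by recursion on the string
lemma pvLoopA_eq_zip (cs : List Char) :
    pvLoopA cs (PySem.List.pyRange 0 ((cs.length : Int) - 2) 1) =
      (cs.zip (cs.drop 2)).any (fun p => p.1 == p.2) := by
  induction cs with
  | nil => simp [PySem.List.pyRange_one_eq_nil, pvLoopA]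
  | cons c0 tl ih =>
    cases tl with
    | nil => simp [PySem.List.pyRange_one_eq_nil, pvLoopA]
    | cons c1 tl2 =>
      cases tl2 with
      | nil => simp [PySem.List.pyRange_one_eq_nil, pvLoopA]
      | cons c2 rest =>
        have hlen : ((c0 :: c1 :: c2 :: rest).length : Int) - 2 = (rest.length : Int) + 1 := by
          rw [List.length_cons, List.length_cons, List.length_cons]; omega
        rw [hlen, PySem.List.pyRange_one_cons (by omega)]
        have hget0 : PySem.List.pyGet? (c0 :: c1 :: c2 :: rest) 0 = some c0 :=
          PySem.List.pyGet?_zero_cons _ _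
        have hget2 : PySem.List.pyGet? (c0 :: c1 :: c2 :: rest) (0 + 2) = some c2 := by
          have h := PySem.List.pyGet?_ofNat (xs := c0 :: c1 :: c2 :: rest) (n := 2) (by simp)
          norm_num at h ⊢
          simpa using h
        simp only [pvLoopA, hget0, hget2]
        have hshift : PySem.List.pyRange (0 + 1) ((rest.length : Int) + 1) 1 =
            (PySem.List.pyRange 0 (rest.length : Int) 1).map (· + 1) := by
          norm_num [pvRange_shift]
        have htail : pvLoopA (c0 :: c1 :: c2 :: rest)
            (PySem.List.pyRange (0 + 1) ((rest.length : Int) + 1) 1) =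
            ((c1 :: c2 :: rest).zip ((c1 :: c2 :: rest).drop 2)).any (fun p => p.1 == p.2) := by
          rw [hshift, pvLoopA_shift c0 _ _ (fun i hi => by
            rw [PySem.List.mem_pyRange_one] at hi; exact hi.1)]
          have h2 : ((c1 :: c2 :: rest).length : Int) - 2 = (rest.length : Int) := by
            rw [List.length_cons, List.length_cons]; omega
          rw [h2] at ih
          exact ih
        rw [htail]
        cases hbe : (c0 == c2) <;> simp [hbe]

-- B's de-interleave-and-adjacent check equals the gap-2 pairing, by two-step recursion
lemma pvSplit_adj (cs : List Char) :
    (pvAdj (pvSplit cs).1 || pvAdj (pvSplit cs).2) =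
      (cs.zip (cs.drop 2)).any (fun p => p.1 == p.2) := by
  match cs with
  | [] => simp [pvSplit, pvAdj]
  | [_] => simp [pvSplit, pvAdj]
  | c0 :: c1 :: rest =>
    have ih := pvSplit_adj (c1 :: rest)
    cases rest with
    | nil => simp [pvSplit, pvAdj]
    | cons c2 rest' =>
      simp only [pvSplit, pvAdj] at ih ⊢
      rw [show ((c0 :: c1 :: c2 :: rest').zip ((c0 :: c1 :: c2 :: rest').drop 2)) =
            (c0, c2) :: ((c1 :: c2 :: rest').zip ((c1 :: c2 :: rest').drop 2)) by simp]
      rw [List.any_cons, ← ih]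
      cases hbe : (c0 == c2) <;> simp [hbe, Bool.or_comm]
termination_by cs.length

theorem pv_main (test_word : String) : one_letter_repeat test_word = one_letter_repeat_alt test_word := by
  unfold one_letter_repeat one_letter_repeat_alt
  rw [pvLoopA_eq_zip, ← pvSplit_adj]
  rw [(pvSplitLoop_eq test_word.toList [] []).1]
  simp [pvAdjLoop_none]

-- ===== VERDICT (by name: the statement is the Claim_ definition above) =====
theorem one_letter_repeat_spec : Claim_equal_one_letter_repeat := by
  intro s _
  unfold Spec_one_letter_repeat
  exact pv_main s
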